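-- pv_equiv track=rewrite | github.com/Shuruyue/Materials-Research | scripts/phase5_active_learning/run_discovery.py | _looks_like_state_dict
-- ===== SOURCE A (Python) =====
-- from collections.abc import Mapping
--
-- def _looks_like_state_dict(payload: Mapping[object, object]) -> bool:
--     if not payload:
--         return False
--     for key in payload:
--         if not isinstance(key, str) or not key:
--             return False
--     return any(
--         "." in key
--         or key in {"weight", "bias"}
--         or key.endswith(("weight", "bias", "running_mean", "running_var", "num_batches_tracked"))
--         for key in payload
--     )
-- ===== SOURCE B (Python) =====
-- def _looks_like_state_dict(payload):
--     def score(key):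
--         # 0 = invalid key, 2 = state-dict-looking key, 1 = valid but plain key
--         if not isinstance(key, str) or not key:
--             return 0
--         if ("." in key
--                 or key in {"weight", "bias"}
--                 or key.endswith(("weight", "bias", "running_mean",
--                                  "running_var", "num_batches_tracked"))):
--             return 2
--         return 1
--     scores = [score(k) for k in payload]
--     return bool(scores) and min(scores) > 0 and max(scores) == 2
-- ===== Notes on version B (the rewrite author's own statement) =====
-- stated objective: alternative
-- what changed: B maps every key to a numeric score (0 invalid, 2 state-dict-like, 1 plain) and decides by aggregation: nonempty and min>0 and max==2, replacing A's early-return validation loop plus any() pass with a map-then-min/max arithmetic formulation.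
import Mathlib
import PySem

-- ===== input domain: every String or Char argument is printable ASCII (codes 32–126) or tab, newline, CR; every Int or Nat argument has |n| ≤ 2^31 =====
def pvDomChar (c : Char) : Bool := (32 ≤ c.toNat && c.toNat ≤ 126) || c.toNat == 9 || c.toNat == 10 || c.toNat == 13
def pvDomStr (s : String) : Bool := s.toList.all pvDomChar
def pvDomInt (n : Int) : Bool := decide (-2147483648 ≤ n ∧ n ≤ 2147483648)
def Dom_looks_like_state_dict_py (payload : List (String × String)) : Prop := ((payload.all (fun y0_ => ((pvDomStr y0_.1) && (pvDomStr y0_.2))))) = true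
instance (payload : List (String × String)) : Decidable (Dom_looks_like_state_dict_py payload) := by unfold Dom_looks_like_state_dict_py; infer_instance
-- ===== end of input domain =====

-- B replaces A's validation loop + any() pass by a map of each key to a score (0/1/2) aggregated with min/max; return value only.
-- ===== PORT A =====
-- the match condition: "." in key or key in {"weight","bias"} or key.endswith((...))
def pvKeyMatch (key : String) : Bool :=
  PySem.Str.isIn "." key
  || (key == "weight" || key == "bias")
  || (PySem.Str.endswith key "weight" || PySem.Str.endswith key "bias"
      || PySem.Str.endswith key "running_mean" || PySem.Str.endswith key "running_var"
      || PySem.Str.endswith key "num_batches_tracked")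

def looks_like_state_dict_py (payload : List (String × String)) : Bool :=
  if payload = [] then false
  else if payload.any (fun kv => kv.1 == "") then false  -- first loop: non-str key impossible here; empty key → False
  else payload.any (fun kv => pvKeyMatch kv.1)           -- the any(...) generator pass

-- ===== PORT B =====
-- score(key): 0 invalid, 2 state-dict-like, 1 plain valid key
def pvScore (key : String) : Int :=
  if key == "" then 0 else if pvKeyMatch key then 2 else 1

-- bool(scores) and min(scores) > 0 and max(scores) == 2  (min/max raise only on [], guarded by bool(scores))
def looks_like_state_dict_py_alt (payload : List (String × String)) : Bool :=
  let scores := payload.map (fun kv => pvScore kv.1)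
  if scores = [] then false
  else
    match PySem.List.min? scores (fun x => x), PySem.List.max? scores (fun x => x) with
    | some m, some M => decide (0 < m) && decide (M = 2)
    | _, _ => false

-- ===== PRECONDITION & SPEC =====
def Spec_looks_like_state_dict_py (payload : List (String × String)) (out : Bool) : Prop := out = looks_like_state_dict_py_alt payload
instance (payload : List (String × String)) (out : Bool) : Decidable (Spec_looks_like_state_dict_py payload out) := by unfold Spec_looks_like_state_dict_py; infer_instance

-- ===== CLAIM (what is proved, stated in full; the proofs are below) =====
def Claim_equal_looks_like_state_dict_py : Prop := ∀ (payload : List (String × String)), Dom_looks_like_state_dict_py payload → Spec_looks_like_state_dict_py payload (looks_like_state_dict_py payload)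

-- ===== LEMMAS AND PROOFS =====

lemma pvScore_pos_iff (key : String) : (0 < pvScore key) ↔ (key == "") = false := by
  unfold pvScore; split_ifs with h1 h2 <;> simp [h1]

lemma pvScore_le_two (key : String) : pvScore key ≤ 2 := by
  unfold pvScore; split_ifs <;> omega

lemma pvScore_eq_two_iff (key : String) :
    pvScore key = 2 ↔ ((key == "") = false ∧ pvKeyMatch key = true) := by
  unfold pvScore; split_ifs with h1 h2
  · simp [h1]
  · simp [h1, h2]
  · simp [h1, h2]

-- ===== VERDICT (by name: the statement is the Claim_ definition above) =====
theorem looks_like_state_dict_py_spec : Claim_equal_looks_like_state_dict_py := by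
  intro payload _
  unfold Spec_looks_like_state_dict_py looks_like_state_dict_py looks_like_state_dict_py_alt
  by_cases hnil : payload = []
  · simp [hnil]
  · have hs : payload.map (fun kv => pvScore kv.1) ≠ [] := by
      simpa using hnil
    simp only [hnil, if_false, hs]
    obtain ⟨m, hm⟩ := Option.ne_none_iff_exists'.mp
      ((not_iff_not.mpr (PySem.List.min?_eq_none_iff (xs := payload.map (fun kv => pvScore kv.1)) (key := fun x => x))).mpr hs)
    obtain ⟨M, hM⟩ := Option.ne_none_iff_exists'.mp
      ((not_iff_not.mpr (PySem.List.max?_eq_none_iff (xs := payload.map (fun kv => pvScore kv.1)) (key := fun x => x))).mpr hs)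
    simp only [hm, hM]
    by_cases hempty : payload.any (fun kv => kv.1 == "") = true
    · -- some key is empty: A = false; its score 0 forces m ≤ 0
      obtain ⟨kv, hkvmem, hkv⟩ := List.any_eq_true.mp hempty
      have h0 : pvScore kv.1 = 0 := by unfold pvScore; simp [hkv]
      have hmle := PySem.List.min?_isMin hm (pvScore kv.1) (List.mem_map_of_mem hkvmem)
      rw [h0] at hmle
      have : ¬ (0 < m) := by simpa using hmle
      simp [hempty, this]
    · -- all keys nonempty: m > 0, and A = B = (M = 2) = any match
      have hne : ∀ kv ∈ payload, (kv.1 == "") = false := by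
        intro kv hkv
        by_contra h
        exact hempty (List.any_eq_true.mpr ⟨kv, hkv, by simpa using h⟩)
      have hmpos : 0 < m := by
        have hmmem := PySem.List.min?_mem hm
        obtain ⟨kv, hkvmem, hkveq⟩ := List.mem_map.mp hmmem
        rw [← hkveq]
        exact (pvScore_pos_iff kv.1).mpr (hne kv hkvmem)
      have hMmem := PySem.List.max?_mem hM
      obtain ⟨kvM, hkvMmem, hkvMeq⟩ := List.mem_map.mp hMmem
      have hany : (payload.any (fun kv => pvKeyMatch kv.1)) = decide (M = 2) := by
        by_cases hM2 : M = 2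
        · have : pvKeyMatch kvM.1 = true := by
            have := (pvScore_eq_two_iff kvM.1).mp (hkvMeq.trans hM2)
            exact this.2
          have h : payload.any (fun kv => pvKeyMatch kv.1) = true :=
            List.any_eq_true.mpr ⟨kvM, hkvMmem, this⟩
          rw [h]; simp [hM2]
        · have hnone : ∀ kv ∈ payload, pvKeyMatch kv.1 = false := by
            intro kv hkv
            by_contra h
            have hmatch : pvKeyMatch kv.1 = true := by simpa using h
            have h2 : pvScore kv.1 = 2 := (pvScore_eq_two_iff kv.1).mpr ⟨hne kv hkv, hmatch⟩
            have hle := PySem.List.max?_isMax hM (pvScore kv.1) (List.mem_map_of_mem hkv)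
            rw [h2] at hle
            have hle2 : M ≤ 2 := hkvMeq ▸ pvScore_le_two kvM.1
            exact hM2 (le_antisymm hle2 hle)
          have h : payload.any (fun kv => pvKeyMatch kv.1) = false :=
            List.any_eq_false.mpr (fun kv hkv => by simp [hnone kv hkv])
          rw [h]; simp [hM2]
      have hemptyf : (payload.any (fun kv => kv.1 == "")) = false :=
        Bool.not_eq_true _ ▸ Bool.of_not_eq_true hempty
      rw [hemptyf]
      simp only [Bool.false_eq_true, if_false, hany, hmpos, decide_true, Bool.true_and]
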